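-- pv_equiv track=rewrite | github.com/seonjinn/RL | nemo_rl/models/megatron/draft/utils.py | _normalize_hf_key
-- ===== SOURCE A (Python) =====
-- def _normalize_hf_key(raw_hf_key: str) -> str:
--     hf_key = raw_hf_key
--     prefixes = ("draft.", "module.", "eagle_module.")
--     changed = True
--     while changed:
--         changed = False
--         for prefix in prefixes:
--             if hf_key.startswith(prefix):
--                 hf_key = hf_key.removeprefix(prefix)
--                 changed = True
--     return hf_key
-- ===== SOURCE B (Python) =====
-- def _normalize_hf_key(raw_hf_key: str) -> str:
--     # Different algorithm: parse the key into dot-separated segments once,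
--     # skip the leading segments that are known wrapper names (each known
--     # prefix is exactly one segment plus its dot), and rejoin the rest.
--     parts = raw_hf_key.split(".")
--     i = 0
--     while i < len(parts) - 1 and parts[i] in ("draft", "module", "eagle_module"):
--         i += 1
--     return ".".join(parts[i:])
-- ===== Notes on version B (the rewrite author's own statement) =====
-- stated objective: alternative
-- what changed: Instead of A's fixpoint loop that repeatedly re-tests and strips string prefixes, B splits the key into dot-separated segments once, skips the leading segments that are known wrapper names (while a later segment exists), and rejoins the remainder.
import Mathlib
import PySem

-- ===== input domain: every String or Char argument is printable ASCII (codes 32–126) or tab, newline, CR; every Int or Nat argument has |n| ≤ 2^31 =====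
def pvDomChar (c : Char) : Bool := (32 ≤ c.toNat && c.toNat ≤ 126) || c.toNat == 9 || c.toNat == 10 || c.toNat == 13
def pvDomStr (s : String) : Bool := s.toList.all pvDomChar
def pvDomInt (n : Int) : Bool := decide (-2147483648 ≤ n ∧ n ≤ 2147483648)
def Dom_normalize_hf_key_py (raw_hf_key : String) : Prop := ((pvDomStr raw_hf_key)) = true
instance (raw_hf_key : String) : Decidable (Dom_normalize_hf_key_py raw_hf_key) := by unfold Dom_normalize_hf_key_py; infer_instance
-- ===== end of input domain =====

-- B replaces A's fixpoint strip-known-prefixes loop by a segment view: split the key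
-- on '.' once, skip leading known wrapper-name segments, and rejoin the remainder.

def pvPfx1 : List Char := ['d','r','a','f','t','.']
def pvPfx2 : List Char := ['m','o','d','u','l','e','.']
def pvPfx3 : List Char := ['e','a','g','l','e','_','m','o','d','u','l','e','.']

-- ===== PORT A =====
-- body of A's inner 'for prefix in prefixes: if hf_key.startswith(prefix): …'
def pvStepA (kc : List Char × Bool) (p : List Char) : List Char × Bool :=
  if PySem.Chars.startswith kc.1 p then (kc.1.drop p.length, true) else kc

def pvPassA (k : List Char) : List Char × Bool :=
  [pvPfx1, pvPfx2, pvPfx3].foldl pvStepA (k, false)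

theorem pvStepA_cases (kc : List Char × Bool) (p : List Char) (hp : 0 < p.length) :
    ((pvStepA kc p).1.length < kc.1.length ∧ (pvStepA kc p).2 = true) ∨ pvStepA kc p = kc := by
  unfold pvStepA
  split_ifs with h
  · left
    refine ⟨?_, rfl⟩
    have := List.IsPrefix.length_le ((PySem.Chars.startswith_iff _ _).mp h)
    simp only [List.length_drop]
    omega
  · right; rfl

-- termination helper for A's outer while loop: a pass that set the flag shortened the key
theorem pvPassA_true_lt (k : List Char) (h : (pvPassA k).2 = true) :
    (pvPassA k).1.length < k.length := by
  have e : pvPassA k = pvStepA (pvStepA (pvStepA (k, false) pvPfx1) pvPfx2) pvPfx3 := rfl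
  rw [e] at h ⊢
  have le1 : (pvStepA (k, false) pvPfx1).1.length ≤ k.length := by
    rcases pvStepA_cases (k, false) pvPfx1 (by decide) with ⟨l, _⟩ | eq
    · exact le_of_lt l
    · rw [eq]
  have le2 : (pvStepA (pvStepA (k, false) pvPfx1) pvPfx2).1.length ≤
      (pvStepA (k, false) pvPfx1).1.length := by
    rcases pvStepA_cases (pvStepA (k, false) pvPfx1) pvPfx2 (by decide) with ⟨l, _⟩ | eq
    · exact le_of_lt l
    · rw [eq]
  rcases pvStepA_cases (pvStepA (pvStepA (k, false) pvPfx1) pvPfx2) pvPfx3 (by decide) with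
    ⟨l3, _⟩ | e3
  · omega
  · rw [e3] at h ⊢
    rcases pvStepA_cases (pvStepA (k, false) pvPfx1) pvPfx2 (by decide) with ⟨l2, _⟩ | e2
    · omega
    · rw [e2] at h ⊢
      rcases pvStepA_cases (k, false) pvPfx1 (by decide) with ⟨l1, _⟩ | e1
      · omega
      · rw [e1] at h
        simp at h

def pvLoopA (k : List Char) : List Char :=
  if h : (pvPassA k).2 = true then pvLoopA (pvPassA k).1 else (pvPassA k).1
  termination_by k.length
  decreasing_by exact pvPassA_true_lt k h

def normalize_hf_key_py (raw_hf_key : String) : String :=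
  String.ofList (pvLoopA raw_hf_key.toList)

-- ===== PORT B =====
-- 'parts[i] in ("draft", "module", "eagle_module")'
def pvKnown (p : List Char) : Bool :=
  p == ['d','r','a','f','t'] || p == ['m','o','d','u','l','e'] ||
    p == ['e','a','g','l','e','_','m','o','d','u','l','e']

-- B's 'while i < len(parts) - 1 and parts[i] in …: i += 1' followed by 'parts[i:]',
-- as the obvious structural recursion over the remaining segment list
def pvSkipSegs (parts : List (List Char)) : List (List Char) :=
  match parts with
  | p :: q :: rest => if pvKnown p then pvSkipSegs (q :: rest) else p :: q :: rest
  | l => l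

def normalize_hf_key_py_alt (raw_hf_key : String) : String :=
  String.ofList
    (PySem.Chars.join ['.'] (pvSkipSegs (PySem.Chars.splitOn raw_hf_key.toList ['.'])))

-- ===== PRECONDITION & SPEC =====
def Spec_normalize_hf_key_py (raw_hf_key : String) (out : String) : Prop := out = normalize_hf_key_py_alt raw_hf_key
instance (raw_hf_key : String) (out : String) : Decidable (Spec_normalize_hf_key_py raw_hf_key out) := by unfold Spec_normalize_hf_key_py; infer_instance

-- ===== CLAIM (what is proved, stated in full; the proofs are below) =====
def Claim_equal_normalize_hf_key_py : Prop := ∀ (raw_hf_key : String), Dom_normalize_hf_key_py raw_hf_key → Spec_normalize_hf_key_py raw_hf_key (normalize_hf_key_py raw_hf_key)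

-- ===== LEMMAS AND PROOFS =====

-- clean recursive model of s.split('.') (cur = current segment, in order)
def pvSplit (cur : List Char) : List Char → List (List Char)
  | [] => [cur]
  | c :: rest => if c = '.' then cur :: pvSplit [] rest else pvSplit (cur ++ [c]) rest

theorem pvSplit_ne_nil (cur : List Char) (l : List Char) : pvSplit cur l ≠ [] := by
  induction l generalizing cur with
  | nil => simp [pvSplit]
  | cons c rest ih =>
    simp only [pvSplit]
    split_ifs
    · simp
    · exact ih _

-- splitOn.go with enough fuel computes pvSplit
theorem pvGo_eq (fuel : Nat) (l cur : List Char) (acc : List (List Char))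
    (h : l.length < fuel) :
    PySem.Chars.splitOn.go ['.'] fuel l cur acc = acc.reverse ++ pvSplit cur.reverse l := by
  induction fuel generalizing l cur acc with
  | zero => omega
  | succ n ih =>
    cases l with
    | nil => simp [PySem.Chars.splitOn.go, pvSplit]
    | cons c rest =>
      simp only [PySem.Chars.splitOn.go]
      by_cases hc : c = '.'
      · subst hc
        rw [if_pos (by simp [List.isPrefixOf])]
        have : List.drop (['.'] : List Char).length ('.' :: rest) = rest := by simp
        rw [this, ih rest [] (cur.reverse :: acc) (by simp at h ⊢; omega)]
        simp [pvSplit]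
      · rw [if_neg (by simp [List.isPrefixOf]; exact Ne.symm hc)]
        rw [ih rest (c :: cur) acc (by simp at h ⊢; omega)]
        simp [pvSplit, hc]

theorem pvSplitOn_eq (k : List Char) :
    PySem.Chars.splitOn k ['.'] = pvSplit [] k := by
  unfold PySem.Chars.splitOn
  rw [pvGo_eq _ _ _ _ (by omega)]
  simp

-- join undoes pvSplit
theorem pvJoin_split (cur l : List Char) :
    PySem.Chars.join ['.'] (pvSplit cur l) = cur ++ l := by
  induction l generalizing cur with
  | nil => simp [pvSplit, PySem.Chars.join_singleton]
  | cons c rest ih =>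
    simp only [pvSplit]
    split_ifs with hc
    · subst hc
      have hne := pvSplit_ne_nil ([] : List Char) rest
      cases hs : pvSplit [] rest with
      | nil => exact absurd hs hne
      | cons q t =>
        have h2 := ih ([] : List Char)
        rw [hs] at h2
        rw [PySem.Chars.join_cons_cons, h2]
        simp
    · rw [ih (cur ++ [c])]; simp

-- splitting a key that starts with a dot-free segment plus '.'
theorem pvSplit_seg (seg r cur : List Char) (hseg : '.' ∉ seg) :
    pvSplit cur (seg ++ '.' :: r) = (cur ++ seg) :: pvSplit [] r := by
  induction seg generalizing cur with
  | nil => simp [pvSplit]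
  | cons c t ih =>
    have hc : c ≠ '.' := by intro h; exact hseg (by simp [h])
    simp only [List.cons_append, pvSplit, if_neg hc]
    rw [ih (cur ++ [c]) (by intro h; exact hseg (by simp [h]))]
    simp

-- decomposition: a split with a second segment exposes the first dot
theorem pvSplit_decomp (k cur p : List Char) (t : List (List Char)) (ht : t ≠ [])
    (h : pvSplit cur k = p :: t) :
    ∃ r, cur ++ k = p ++ '.' :: r ∧ pvSplit [] r = t := by
  induction k generalizing cur with
  | nil =>
    simp only [pvSplit] at h
    injection h with h1 h2
    exact absurd h2.symm ht
  | cons c rest ih =>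
    simp only [pvSplit] at h
    split_ifs at h with hc
    · subst hc
      injection h with h1 h2
      subst h1; subst h2
      exact ⟨rest, rfl, rfl⟩
    · obtain ⟨r, hr, hs⟩ := ih (cur ++ [c]) h
      exact ⟨r, by simpa using hr, hs⟩

-- B's result as a function of the raw key
def pvB (k : List Char) : List Char :=
  PySem.Chars.join ['.'] (pvSkipSegs (pvSplit [] k))

theorem pvKnown_pfx (p : List Char) (hp : pvKnown p = true) :
    (p ++ ['.'] = pvPfx1 ∨ p ++ ['.'] = pvPfx2 ∨ p ++ ['.'] = pvPfx3) ∧ '.' ∉ p := by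
  simp only [pvKnown, Bool.or_eq_true, beq_iff_eq] at hp
  rcases hp with (rfl | rfl) | rfl <;> refine ⟨?_, by decide⟩
  · left; rfl
  · right; left; rfl
  · right; right; rfl

-- B absorbs one stripped prefix
theorem pvB_cons (seg r : List Char) (hk : pvKnown seg = true) (hseg : '.' ∉ seg) :
    pvB (seg ++ '.' :: r) = pvB r := by
  unfold pvB
  rw [pvSplit_seg seg r [] hseg]
  simp only [List.nil_append]
  have hne := pvSplit_ne_nil ([] : List Char) r
  cases hs : pvSplit [] r with
  | nil => exact absurd hs hne
  | cons q t => simp [pvSkipSegs, hk]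

-- if no known prefix matches, B leaves the key unchanged
theorem pvB_fix (k : List Char)
    (h1 : PySem.Chars.startswith k pvPfx1 = false)
    (h2 : PySem.Chars.startswith k pvPfx2 = false)
    (h3 : PySem.Chars.startswith k pvPfx3 = false) :
    pvB k = k := by
  unfold pvB
  have hfix : pvSkipSegs (pvSplit [] k) = pvSplit [] k := by
    cases hs : pvSplit [] k with
    | nil => rfl
    | cons p t =>
      cases t with
      | nil => rfl
      | cons q rest =>
        simp only [pvSkipSegs]
        split_ifs with hkn
        · exfalso
          obtain ⟨r, hr, _⟩ := pvSplit_decomp k [] p (q :: rest) (by simp) hs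
          simp only [List.nil_append] at hr
          obtain ⟨hp, _⟩ := pvKnown_pfx p hkn
          have hpre : p ++ ['.'] <+: k := by
            rw [hr]
            exact ⟨r, by simp⟩
          rcases hp with hp | hp | hp <;> rw [hp] at hpre
          · rw [(PySem.Chars.startswith_iff k pvPfx1).mpr hpre] at h1; exact absurd h1 (by simp)
          · rw [(PySem.Chars.startswith_iff k pvPfx2).mpr hpre] at h2; exact absurd h2 (by simp)
          · rw [(PySem.Chars.startswith_iff k pvPfx3).mpr hpre] at h3; exact absurd h3 (by simp)
        · rfl
  rw [hfix, pvJoin_split]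
  simp

-- B absorbs one A-step for any of the three prefixes
theorem pvB_stepA (kc : List Char × Bool) (p : List Char)
    (hp : p = pvPfx1 ∨ p = pvPfx2 ∨ p = pvPfx3) :
    pvB (pvStepA kc p).1 = pvB kc.1 := by
  unfold pvStepA
  split_ifs with h
  · obtain ⟨r, hr⟩ := (PySem.Chars.startswith_iff _ _).mp h
    rw [← hr]
    rcases hp with rfl | rfl | rfl
    · rw [List.drop_left]
      exact (pvB_cons ['d','r','a','f','t'] r (by decide) (by decide)).symm
    · rw [List.drop_left]
      exact (pvB_cons ['m','o','d','u','l','e'] r (by decide) (by decide)).symm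
    · rw [List.drop_left]
      exact (pvB_cons ['e','a','g','l','e','_','m','o','d','u','l','e'] r
        (by decide) (by decide)).symm
  · rfl

-- hence B absorbs a whole A-pass
theorem pvB_passA (k : List Char) : pvB (pvPassA k).1 = pvB k := by
  have e : pvPassA k = pvStepA (pvStepA (pvStepA (k, false) pvPfx1) pvPfx2) pvPfx3 := rfl
  rw [e, pvB_stepA _ pvPfx3 (by tauto), pvB_stepA _ pvPfx2 (by tauto),
    pvB_stepA _ pvPfx1 (by tauto)]

theorem pvStepA_snd_false (kc : List Char × Bool) (p : List Char)
    (h : (pvStepA kc p).2 = false) :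
    pvStepA kc p = kc ∧ PySem.Chars.startswith kc.1 p = false := by
  unfold pvStepA at h ⊢
  split_ifs at h ⊢ with hf
  · exact ⟨rfl, by simpa using hf⟩

-- if a pass set no flag then nothing matched
theorem pvPassA_snd_false (k : List Char) (h : (pvPassA k).2 = false) :
    PySem.Chars.startswith k pvPfx1 = false ∧ PySem.Chars.startswith k pvPfx2 = false ∧
      PySem.Chars.startswith k pvPfx3 = false := by
  have e : pvPassA k = pvStepA (pvStepA (pvStepA (k, false) pvPfx1) pvPfx2) pvPfx3 := rfl
  rw [e] at h
  obtain ⟨q3, g3⟩ := pvStepA_snd_false _ pvPfx3 h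
  rw [q3] at h
  obtain ⟨q2, g2⟩ := pvStepA_snd_false _ pvPfx2 h
  rw [q2] at h
  rw [q2] at g3
  obtain ⟨q1, g1⟩ := pvStepA_snd_false _ pvPfx1 h
  rw [q1] at g2 g3
  exact ⟨by simpa using g1, by simpa using g2, by simpa using g3⟩

theorem pvMain : ∀ (n : Nat) (k : List Char), k.length ≤ n → pvLoopA k = pvB k := by
  intro n
  induction n with
  | zero =>
    intro k hk
    have hk0 : k = [] := by
      cases k with
      | nil => rfl
      | cons a t => simp at hk
    subst hk0
    rw [pvLoopA, dif_neg (by decide)]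
    decide
  | succ n ih =>
    intro k hk
    rw [pvLoopA]
    by_cases h : (pvPassA k).2 = true
    · rw [dif_pos h]
      have hlt := pvPassA_true_lt k h
      rw [ih _ (by omega)]
      exact pvB_passA k
    · rw [dif_neg h]
      obtain ⟨g1, g2, g3⟩ := pvPassA_snd_false k (by simpa using h)
      have hp : pvPassA k = (k, false) := by
        simp [pvPassA, pvStepA, List.foldl, g1, g2, g3]
      rw [hp]
      exact (pvB_fix k g1 g2 g3).symm

-- ===== VERDICT (by name: the statement is the Claim_ definition above) =====
theorem normalize_hf_key_py_spec : Claim_equal_normalize_hf_key_py := by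
  intro s _
  unfold Spec_normalize_hf_key_py normalize_hf_key_py normalize_hf_key_py_alt
  rw [pvSplitOn_eq, pvMain s.toList.length s.toList le_rfl]
  rfl
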